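-- pv_equiv track=rewrite | github.com/dmitry957/codewars-training | kata/4-kyu/elementary-conveyor/solution.py | path_counter
-- ===== SOURCE A (Python) =====
-- from collections import deque
--
-- def path_counter(m):
--     rows = len(m)
--     cols = len(m[0])
--     f_pos = None
--     for row in range(rows):
--         for col in range(cols):
--             if m[row][col] == 'f':
--                 f_pos = (row, col)
--                 break
--         if f_pos:
--             break
--
--     directions_map = {
--         'r': (0, 1),
--         'l': (0, -1),
--         'u': (-1, 0),
--         'd': (1, 0),
--         'f': (0, 0)
--     }
--
--     reverse_graph = [[[] for _ in range(cols)] for _ in range(rows)]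
--     for row in range(rows):
--         for col in range(cols):
--             d = m[row][col]
--             if d == 'f':
--                 continue
--             dr, dc = directions_map[d]
--             nr = (row + dr) % rows
--             nc = (col + dc) % cols
--             reverse_graph[nr][nc].append((row, col))
--
--     dist = [[-1] * cols for _ in range(rows)]
--     dist[f_pos[0]][f_pos[1]] = 0
--
--     q = deque([f_pos])
--     while q:
--         r, c = q.popleft()
--         for rr, cc in reverse_graph[r][c]:
--             if dist[rr][cc] == -1:
--                 dist[rr][cc] = dist[r][c] + 1
--                 q.append((rr, cc))
--
--     return dist
-- ===== SOURCE B (Python) =====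
-- def path_counter(m):
--     rows, cols = len(m), len(m[0])
--     f_pos = next((r, c) for r in range(rows) for c in range(cols) if m[r][c] == 'f')
--     steps = {'r': (0, 1), 'l': (0, -1), 'u': (-1, 0), 'd': (1, 0), 'f': (0, 0)}
--
--     def succ(r, c):
--         dr, dc = steps[m[r][c]]
--         return (r + dr) % rows, (c + dc) % cols
--
--     dist = [[0 if (r, c) == f_pos else -1 for c in range(cols)] for r in range(rows)]
--     for _ in range(rows * cols):
--         new = [[0 if (r, c) == f_pos else
--                 (dist[succ(r, c)[0]][succ(r, c)[1]] + 1 if dist[succ(r, c)[0]][succ(r, c)[1]] >= 0 else -1)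
--                 for c in range(cols)]
--                for r in range(rows)]
--         if new == dist:
--             break
--         dist = new
--     return dist
-- ===== Notes on version B (the rewrite author's own statement) =====
-- stated objective: alternative
-- what changed: Replaces A's reverse-graph construction plus deque BFS from the target by a forward fixed-point iteration: every cell's distance is synchronously recomputed from its single successor cell (with 'f' treated as a self-loop) until the grid stabilises, so no reverse adjacency lists and no queue are built.
import Mathlib
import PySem

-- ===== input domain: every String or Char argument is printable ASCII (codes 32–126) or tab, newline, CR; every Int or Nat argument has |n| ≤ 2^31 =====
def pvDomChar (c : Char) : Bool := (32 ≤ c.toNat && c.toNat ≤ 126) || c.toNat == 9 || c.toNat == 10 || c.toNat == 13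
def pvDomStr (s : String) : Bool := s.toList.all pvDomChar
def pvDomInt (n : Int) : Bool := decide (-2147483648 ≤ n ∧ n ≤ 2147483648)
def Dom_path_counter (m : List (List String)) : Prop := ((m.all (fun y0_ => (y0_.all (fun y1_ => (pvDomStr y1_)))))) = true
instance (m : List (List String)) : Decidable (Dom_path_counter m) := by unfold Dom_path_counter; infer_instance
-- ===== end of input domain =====

-- B replaces A's reverse-graph + deque BFS by a forward fixed-point iteration: each cell's
-- distance is recomputed from its single successor until the grid stabilises (objective: alternative).

-- ===== PORT A =====
-- shared cell accessors (both Pythons index m[r][c], dist[r][c] and write grid cells the same way);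
-- indices are in range under Pre_, so `getD`/`.toNat` are exact here (Python raises outside Pre_).
def pvCell (m : List (List String)) (r c : Nat) : String := (m.getD r []).getD c ""

def pvGet2 {α : Type} (g : List (List α)) (r c : Int) (d : α) : α :=
  (g.getD r.toNat []).getD c.toNat d

def pvMod2 {α : Type} (g : List (List α)) (r c : Int) (f : α → α) : List (List α) :=
  g.modify r.toNat (fun row => row.modify c.toNat f)

-- directions_map / steps dict (identical literal in both sources); default (0,0) is unreachable
-- under Pre_ (a key outside 'rludf' is a Python KeyError, excluded).
def pvDir (s : String) : Int × Int :=
  if s = "r" then (0, 1) else if s = "l" then (0, -1)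
  else if s = "u" then (-1, 0) else if s = "d" then (1, 0) else (0, 0)

-- (row+dr) % rows, (col+dc) % cols — the toroidal move both Pythons compute from the dict
def pvStep (m : List (List String)) (rows cols : Int) (r c : Int) : Int × Int :=
  let dd := pvDir (pvCell m r.toNat c.toNat)
  (PySem.Int.mod (r + dd.1) rows, PySem.Int.mod (c + dd.2) cols)

-- A's double loop with `break` hunting the first 'f' (tuples are always truthy, so it breaks at the first hit)
def pvFindA (m : List (List String)) (rows cols : Nat) : Option (Int × Int) :=
  (List.range rows).findSome? fun (r : Nat) =>
    Option.map (fun (c : Nat) => ((r : Int), (c : Int)))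
      ((List.range cols).find? fun c => pvCell m r c == "f")

-- A's reverse_graph construction
def pvRG (m : List (List String)) (rows cols : Nat) : List (List (List (Int × Int))) :=
  (List.range rows).foldl
    (fun g r =>
      (List.range cols).foldl
        (fun g c =>
          if pvCell m r c = "f" then g
          else
            let p := pvStep m rows cols r c
            pvMod2 g p.1 p.2 (fun l => l ++ [((r : Int), (c : Int))]))
        g)
    (List.replicate rows (List.replicate cols []))

-- A's BFS over the reverse graph; fuel rows*cols+1 only makes the `while q:` loop total
-- (each cell is enqueued at most once, so the fuel is never exhausted)
def pvBFSA (rg : List (List (List (Int × Int)))) :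
    Nat → List (Int × Int) → List (List Int) → List (List Int)
  | 0, _, dist => dist
  | _ + 1, [], dist => dist
  | fuel + 1, p :: q, dist =>
    let st :=
      (pvGet2 rg p.1 p.2 []).foldl
        (fun (st : List (Int × Int) × List (List Int)) pr =>
          if pvGet2 st.2 pr.1 pr.2 0 = -1 then
            (st.1 ++ [pr], pvMod2 st.2 pr.1 pr.2 (fun _ => pvGet2 st.2 p.1 p.2 0 + 1))
          else st)
        (q, dist)
    pvBFSA rg fuel st.1 st.2

def path_counter (m : List (List String)) : List (List Int) :=
  let rows := m.length
  let cols := (m.headD []).length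
  match pvFindA m rows cols with
  | none => []        -- Python: TypeError (no 'f' found); excluded by Pre_
  | some f0 =>
    let rg := pvRG m rows cols
    let dist0 := pvMod2 (List.replicate rows (List.replicate cols (-1))) f0.1 f0.2 (fun _ => 0)
    pvBFSA rg (rows * cols + 1) [f0] dist0

-- ===== PORT B =====
-- B's `next(...)` over the row-major generator product
def pvFindB (m : List (List String)) (rows cols : Nat) : Option (Int × Int) :=
  Option.map (fun (p : Nat × Nat) => ((p.1 : Int), (p.2 : Int)))
    (((List.range rows).flatMap fun (r : Nat) => (List.range cols).map fun (c : Nat) => (r, c)).find?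
      fun p => pvCell m p.1 p.2 == "f")

-- one synchronous update of the whole grid from each cell's successor
def pvUpdB (m : List (List String)) (rows cols : Nat) (f0 : Int × Int)
    (d : List (List Int)) : List (List Int) :=
  (List.range rows).map fun (r : Nat) =>
    (List.range cols).map fun (c : Nat) =>
      if ((r : Int), (c : Int)) = f0 then 0
      else
        let n := pvStep m rows cols r c
        let v := pvGet2 d n.1 n.2 0
        if v ≥ 0 then v + 1 else -1

-- `for _ in range(rows*cols): … if new == dist: break`
def pvLoopB (m : List (List String)) (rows cols : Nat) (f0 : Int × Int) :
    Nat → List (List Int) → List (List Int)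
  | 0, d => d
  | k + 1, d =>
    let d' := pvUpdB m rows cols f0 d
    if d' = d then d else pvLoopB m rows cols f0 k d'

def path_counter_alt (m : List (List String)) : List (List Int) :=
  let rows := m.length
  let cols := (m.headD []).length
  match pvFindB m rows cols with
  | none => []        -- Python: StopIteration (no 'f' found); excluded by Pre_
  | some f0 =>
    let d0 := (List.range rows).map fun (r : Nat) =>
      (List.range cols).map fun (c : Nat) => if ((r : Int), (c : Int)) = f0 then (0 : Int) else -1
    pvLoopB m rows cols f0 (rows * cols) d0

-- ===== PRECONDITION & SPEC =====
-- Pre_ = exactly the inputs on which A returns: a nonempty grid whose first row is nonempty,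
-- every row at least as long as the first (else IndexError), every cell in the first len(m[0])
-- columns one of 'r','l','u','d','f' (else KeyError), and at least one 'f' among those cells
-- (else f_pos stays None and A raises TypeError).
def Pre_path_counter (m : List (List String)) : Prop :=
  m ≠ [] ∧ 0 < (m.headD []).length ∧
  (∀ row ∈ m, (m.headD []).length ≤ row.length) ∧
  (∀ row ∈ m, ∀ s ∈ row.take (m.headD []).length, s ∈ (["r", "l", "u", "d", "f"] : List String)) ∧
  (∃ row ∈ m, "f" ∈ row.take (m.headD []).length)
instance (m : List (List String)) : Decidable (Pre_path_counter m) := by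
  unfold Pre_path_counter; infer_instance

def pvWitness_path_counter : List (List String) := [["r", "f"], ["l", "u"]]

def Spec_path_counter (m : List (List String)) (out : List (List Int)) : Prop := out = path_counter_alt m
instance (m : List (List String)) (out : List (List Int)) : Decidable (Spec_path_counter m out) := by
  unfold Spec_path_counter; infer_instance

-- ===== CLAIM (what is proved, stated in full; the proofs are below) =====
def Claim_equal_path_counter : Prop :=
  ∀ (m : List (List String)), Dom_path_counter m → Pre_path_counter m →
    Spec_path_counter m (path_counter m)

-- ===== LEMMAS AND PROOFS =====

-- spec-side vocabulary -------------------------------------------------------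
def pvR (m : List (List String)) : Nat := m.length
def pvC (m : List (List String)) : Nat := (m.headD []).length
def pvN (m : List (List String)) : Nat := pvR m * pvC m

def pvValid (m : List (List String)) (p : Int × Int) : Prop :=
  0 ≤ p.1 ∧ p.1 < (pvR m : Int) ∧ 0 ≤ p.2 ∧ p.2 < (pvC m : Int)

def pvStepP (m : List (List String)) (p : Int × Int) : Int × Int :=
  pvStep m (pvR m) (pvC m) p.1 p.2

def pvIt (m : List (List String)) (k : Nat) (p : Int × Int) : Int × Int :=
  (pvStepP m)^[k] p

def pvCD (m : List (List String)) (f0 p : Int × Int) : Option Nat :=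
  (List.range (pvN m)).find? fun k => pvIt m k p == f0

def pvCdI (m : List (List String)) (f0 p : Int × Int) : Int :=
  match pvCD m f0 p with
  | some j => (j : Int)
  | none => -1

def pvG (m : List (List String)) (f0 : Int × Int) : List (List Int) :=
  (List.range (pvR m)).map fun (r : Nat) => (List.range (pvC m)).map fun (c : Nat) => pvCdI m f0 ((r : Int), (c : Int))

def pvShape {α : Type} (R C : Nat) (g : List (List α)) : Prop :=
  g.length = R ∧ ∀ i (h : i < g.length), g[i].length = C

def pvRowMajor (R C : Nat) : List (Int × Int) :=
  (List.range R).flatMap fun (r : Nat) => (List.range C).map fun (c : Nat) => ((r : Int), (c : Int))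

-- grid lemmas ----------------------------------------------------------------
theorem pvGet2_eq {α : Type} {R C : Nat} {g : List (List α)} (hsh : pvShape R C g)
    {t : Int × Int} (ht : 0 ≤ t.1 ∧ t.1 < (R : Int) ∧ 0 ≤ t.2 ∧ t.2 < (C : Int)) (d : α) :
    ∃ (h1 : t.1.toNat < g.length) (h2 : t.2.toNat < g[t.1.toNat].length),
      pvGet2 g t.1 t.2 d = g[t.1.toNat][t.2.toNat] := by
  obtain ⟨hl, hrow⟩ := hsh
  obtain ⟨h1, h2, h3, h4⟩ := ht
  have hr : t.1.toNat < g.length := by omega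
  have hc : t.2.toNat < g[t.1.toNat].length := by rw [hrow _ hr]; omega
  refine ⟨hr, hc, ?_⟩
  unfold pvGet2
  rw [List.getD_eq_getElem _ _ hr, List.getD_eq_getElem _ _ hc]
theorem pvShape_mod2 {α : Type} {R C : Nat} {g : List (List α)} (hsh : pvShape R C g)
    (r c : Int) (f : α → α) : pvShape R C (pvMod2 g r c f) := by
  obtain ⟨hl, hrow⟩ := hsh
  refine ⟨by simpa [pvMod2] using hl, ?_⟩
  intro i h
  have h' : i < g.length := by simpa [pvMod2] using h
  unfold pvMod2
  rw [List.getElem_modify]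
  split
  · rw [List.length_modify]; exact hrow i h'
  · exact hrow i h'
theorem pvGet2_mod2 {α : Type} {R C : Nat} {g : List (List α)} (hsh : pvShape R C g)
    {q t : Int × Int} (hq : 0 ≤ q.1 ∧ q.1 < (R : Int) ∧ 0 ≤ q.2 ∧ q.2 < (C : Int))
    (ht : 0 ≤ t.1 ∧ t.1 < (R : Int) ∧ 0 ≤ t.2 ∧ t.2 < (C : Int)) (f : α → α) (d : α) :
    pvGet2 (pvMod2 g q.1 q.2 f) t.1 t.2 d =
      if t = q then f (pvGet2 g q.1 q.2 d) else pvGet2 g t.1 t.2 d := by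
  obtain ⟨hm1, hm2, hL⟩ := pvGet2_eq (pvShape_mod2 hsh q.1 q.2 f) ht d
  obtain ⟨hg1, hg2, hG⟩ := pvGet2_eq hsh ht d
  obtain ⟨hq1, hq2, hQ⟩ := pvGet2_eq hsh hq d
  rw [hL, hG, hQ]
  have heq : t = q ↔ (q.1.toNat = t.1.toNat ∧ q.2.toNat = t.2.toNat) := by
    obtain ⟨a1,a2,a3,a4⟩ := hq; obtain ⟨b1,b2,b3,b4⟩ := ht
    constructor
    · rintro rfl; exact ⟨rfl, rfl⟩
    · rintro ⟨e1, e2⟩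
      have : t.1 = q.1 := by omega
      have : t.2 = q.2 := by omega
      exact Prod.ext ‹t.1 = q.1› ‹t.2 = q.2›
  by_cases h1 : q.1.toNat = t.1.toNat
  · by_cases h2 : q.2.toNat = t.2.toNat
    · rw [if_pos (heq.mpr ⟨h1, h2⟩)]
      have : (pvMod2 g q.1 q.2 f)[t.1.toNat][t.2.toNat]
          = f (g[q.1.toNat]'hq1)[q.2.toNat] := by
        simp only [pvMod2, List.getElem_modify, h1, h2]
        simp
      rw [this]
    · rw [if_neg (fun ht' => h2 (heq.mp ht').2)]
      have : (pvMod2 g q.1 q.2 f)[t.1.toNat][t.2.toNat] = g[t.1.toNat][t.2.toNat] := by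
        simp only [pvMod2, List.getElem_modify, h1]
        simp [h2]
      rw [this]
  · rw [if_neg (fun ht' => h1 (heq.mp ht').1)]
    have : (pvMod2 g q.1 q.2 f)[t.1.toNat][t.2.toNat] = g[t.1.toNat][t.2.toNat] := by
      simp only [pvMod2, List.getElem_modify]
      simp [h1]
    rw [this]
theorem pvShape_mapGrid {α : Type} {R C : Nat} (F : Nat → Nat → α) :
    pvShape R C ((List.range R).map fun r => (List.range C).map fun c => F r c) := by
  constructor
  · simp
  · intro i h
    simp
theorem pvGet2_mapGrid {α : Type} {R C : Nat} (F : Nat → Nat → α)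
    {t : Int × Int} (ht : 0 ≤ t.1 ∧ t.1 < (R : Int) ∧ 0 ≤ t.2 ∧ t.2 < (C : Int)) (d : α) :
    pvGet2 ((List.range R).map fun r => (List.range C).map fun c => F r c) t.1 t.2 d =
      F t.1.toNat t.2.toNat := by
  obtain ⟨h1, h2, hL⟩ := pvGet2_eq (pvShape_mapGrid F) ht d
  rw [hL]
  simp
theorem pvShape_replicate {α : Type} (R C : Nat) (x : α) :
    pvShape R C (List.replicate R (List.replicate C x)) := by
  constructor
  · simp
  · intro i h
    simp
theorem pvGrid_ext {α : Type} {R C : Nat} {g1 g2 : List (List α)}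
    (h1 : pvShape R C g1) (h2 : pvShape R C g2)
    (h : ∀ t : Int × Int, (0 ≤ t.1 ∧ t.1 < (R : Int) ∧ 0 ≤ t.2 ∧ t.2 < (C : Int)) →
      ∀ d, pvGet2 g1 t.1 t.2 d = pvGet2 g2 t.1 t.2 d) : g1 = g2 := by
  apply List.ext_getElem
  · obtain ⟨a1, _⟩ := h1; obtain ⟨b1, _⟩ := h2; omega
  intro i hi1 hi2
  apply List.ext_getElem
  · obtain ⟨a1, a2⟩ := h1; obtain ⟨b1, b2⟩ := h2
    rw [a2 i hi1, b2 i hi2]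
  intro j hj1 hj2
  have hiR : i < R := by obtain ⟨a1, _⟩ := h1; omega
  have hjC : j < C := by obtain ⟨a1, a2⟩ := h1; have := a2 i hi1; omega
  have hv : (0 : Int) ≤ ((i : Int), (j : Int)).1 ∧ ((i : Int), (j : Int)).1 < (R : Int) ∧
      (0 : Int) ≤ ((i : Int), (j : Int)).2 ∧ ((i : Int), (j : Int)).2 < (C : Int) := by
    simp; omega
  have e1 := pvGet2_eq h1 hv g1[i][j]
  have e2 := pvGet2_eq h2 hv g1[i][j]
  obtain ⟨c1, c2, e1⟩ := e1
  obtain ⟨d1, d2, e2⟩ := e2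
  have := h _ hv g1[i][j]
  exact e1.symm.trans (this.trans e2)
theorem pvMem_rowMajor {R C : Nat} {t : Int × Int} :
    t ∈ pvRowMajor R C ↔ (0 ≤ t.1 ∧ t.1 < (R : Int) ∧ 0 ≤ t.2 ∧ t.2 < (C : Int)) := by
  unfold pvRowMajor
  simp only [List.mem_flatMap, List.mem_map, List.mem_range]
  constructor
  · rintro ⟨r, hr, c, hc, rfl⟩
    refine ⟨?_, ?_, ?_, ?_⟩ <;> simp only [] <;> omega
  · rintro ⟨h1, h2, h3, h4⟩
    refine ⟨t.1.toNat, by omega, t.2.toNat, by omega, ?_⟩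
    obtain ⟨a, b⟩ := t
    simp only [Prod.mk.injEq]
    simp only at h1 h2 h3 h4
    constructor <;> omega
theorem pvNodup_rowMajor {R C : Nat} : (pvRowMajor R C).Nodup := by
  unfold pvRowMajor
  rw [List.nodup_flatMap]
  constructor
  · intro r _
    apply List.Nodup.map _ List.nodup_range
    intro a b h
    simpa using h
  · rw [List.pairwise_iff_getElem]
    intro i j hi hj hij
    simp only [Function.onFun, List.getElem_range, List.Disjoint]
    intro x hx hy
    simp only [List.mem_map, List.mem_range] at hx hy
    obtain ⟨c1, _, rfl⟩ := hx
    obtain ⟨c2, _, he⟩ := hy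
    have : (i : Int) = (j : Int) := by
      have := (Prod.mk.injEq _ _ _ _).mp he
      exact this.1.symm
    have : i = j := by exact_mod_cast this
    omega
theorem pvFind_aux (m : List (List String)) (cols : Nat) : ∀ ls : List Nat,
    Option.map (fun (p : Nat × Nat) => ((p.1 : Int), (p.2 : Int)))
      ((ls.flatMap fun (r : Nat) => (List.range cols).map fun (c : Nat) => (r, c)).find?
        fun p => pvCell m p.1 p.2 == "f")
    = ls.findSome? fun (r : Nat) =>
        Option.map (fun (c : Nat) => ((r : Int), (c : Int)))
          ((List.range cols).find? fun c => pvCell m r c == "f") := by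
  intro ls
  induction ls with
  | nil => rfl
  | cons r ls ih =>
    simp only [List.flatMap_cons, List.find?_append, List.findSome?_cons]
    have hmap : ((List.range cols).map fun (c : Nat) => (r, c)).find? (fun p => pvCell m p.1 p.2 == "f")
        = ((List.range cols).find? fun c => pvCell m r c == "f").map fun c => (r, c) := by
      rw [List.find?_map]
      rfl
    rw [hmap]
    cases hc : (List.range cols).find? fun c => pvCell m r c == "f" with
    | some c => rfl
    | none => simpa using ih

theorem pvFind_eq (m : List (List String)) (rows cols : Nat) :
    pvFindB m rows cols = pvFindA m rows cols :=
  pvFind_aux m cols (List.range rows)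

theorem pvFindA_isSome (m : List (List String)) (hp : Pre_path_counter m) :
    ∃ f0, pvFindA m (pvR m) (pvC m) = some f0 := by
  cases h : pvFindA m (pvR m) (pvC m) with
  | some f0 => exact ⟨f0, rfl⟩
  | none =>
    exfalso
    obtain ⟨_, _, h3, _, row, hrow, hf⟩ := hp
    obtain ⟨r, hr, rfl⟩ := List.mem_iff_getElem.mp hrow
    obtain ⟨c, hc, hcf⟩ := List.mem_take_iff_getElem.mp hf
    unfold pvFindA at h
    rw [List.findSome?_eq_none_iff] at h
    have hmem : r ∈ List.range (pvR m) := by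
      simp [pvR]; omega
    have := h r hmem
    rw [Option.map_eq_none_iff, List.find?_eq_none] at this
    have hcm : c ∈ List.range (pvC m) := by
      simp only [List.mem_range, pvC]; omega
    apply this c hcm
    have : pvCell m r c = "f" := by
      unfold pvCell
      have hrow2 := h3 (m[r]) (List.getElem_mem hr)
      rw [List.getD_eq_getElem _ _ hr, List.getD_eq_getElem _ _ (by omega)]
      exact hcf
    simp [this]

theorem pvFindA_valid {m : List (List String)} {f0 : Int × Int}
    (h : pvFindA m (pvR m) (pvC m) = some f0) : pvValid m f0 := by
  unfold pvFindA at h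
  obtain ⟨r, hr, hf⟩ := List.exists_of_findSome?_eq_some h
  rw [Option.map_eq_some_iff] at hf
  obtain ⟨c, hc, rfl⟩ := hf
  have hcm := List.mem_of_find?_eq_some hc
  simp only [List.mem_range] at hr hcm
  refine ⟨?_, ?_, ?_, ?_⟩ <;> simp only [pvValid] <;> omega

-- chain-distance (cd) facts ---------------------------------------------------
theorem pvStepP_valid {m : List (List String)} (hR : 0 < pvR m) (hC : 0 < pvC m)
    (p : Int × Int) : pvValid m (pvStepP m p) := by
  unfold pvStepP pvStep pvValid
  have h1 : (0 : Int) < (pvR m : Int) := by exact_mod_cast hR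
  have h2 : (0 : Int) < (pvC m : Int) := by exact_mod_cast hC
  exact ⟨PySem.Int.mod_nonneg _ h1, PySem.Int.mod_lt _ h1, PySem.Int.mod_nonneg _ h2, PySem.Int.mod_lt _ h2⟩

theorem pvIt_valid {m : List (List String)} (hR : 0 < pvR m) (hC : 0 < pvC m)
    {p : Int × Int} (hp : pvValid m p) (k : Nat) : pvValid m (pvIt m k p) := by
  induction k with
  | zero => exact hp
  | succ k ih =>
    rw [pvIt, Function.iterate_succ_apply']
    exact pvStepP_valid hR hC _

theorem pvCD_spec {m : List (List String)} {f0 p : Int × Int} {k : Nat}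
    (h : pvCD m f0 p = some k) :
    k < pvN m ∧ pvIt m k p = f0 ∧ ∀ j < k, pvIt m j p ≠ f0 := by
  unfold pvCD at h
  rw [List.find?_eq_some_iff_getElem] at h
  obtain ⟨hq, i, hi, hik, hmin⟩ := h
  simp only [List.getElem_range] at hik hmin
  subst hik
  simp only [List.length_range] at hi
  refine ⟨hi, by simpa using hq, ?_⟩
  intro j hj he
  have := hmin j hj
  simp [he] at this

theorem pvEnc_lt {R C a b : Nat} (ha : a < R) (hb : b < C) : a * C + b < R * C := by
  calc a * C + b < a * C + C := by omega
    _ = (a + 1) * C := by ring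
    _ ≤ R * C := Nat.mul_le_mul_right C ha

theorem pvEnc_inj {C a1 b1 a2 b2 : Nat} (hb1 : b1 < C) (hb2 : b2 < C)
    (h : a1 * C + b1 = a2 * C + b2) : a1 = a2 ∧ b1 = b2 := by
  rcases lt_trichotomy a1 a2 with hlt | heq | hgt
  · exfalso
    have : a1 * C + b1 < a2 * C + b2 := by
      calc a1 * C + b1 < (a1 + 1) * C := by ring_nf; omega
        _ ≤ a2 * C := Nat.mul_le_mul_right C hlt
        _ ≤ a2 * C + b2 := by omega
    omega
  · subst heq; omega
  · exfalso
    have : a2 * C + b2 < a1 * C + b1 := by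
      calc a2 * C + b2 < (a2 + 1) * C := by ring_nf; omega
        _ ≤ a1 * C := Nat.mul_le_mul_right C hgt
        _ ≤ a1 * C + b1 := by omega
    omega

-- pigeonhole: a chain that reaches f0 at all reaches it in < N steps
theorem pvCD_of_reach {m : List (List String)} (hR : 0 < pvR m) (hC : 0 < pvC m)
    {f0 p : Int × Int} (hp : pvValid m p) {L : Nat} (hL : pvIt m L p = f0) :
    ∃ j, pvCD m f0 p = some j := by
  have hex : ∃ k, pvIt m k p = f0 := ⟨L, hL⟩
  classical
  let j := Nat.find hex
  have hj : pvIt m j p = f0 := Nat.find_spec hex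
  have hmin : ∀ i < j, pvIt m i p ≠ f0 := fun i hi => Nat.find_min hex hi
  -- injective encoding of the first j+1 chain cells into Fin (R*C)
  have hvalid : ∀ i : Nat, pvValid m (pvIt m i p) := fun i => pvIt_valid hR hC hp i
  have hbound : ∀ i : Nat, (pvIt m i p).1.toNat * pvC m + (pvIt m i p).2.toNat < pvN m := by
    intro i
    obtain ⟨a1, a2, a3, a4⟩ := hvalid i
    exact pvEnc_lt (by omega) (by omega)
  have hinj : Function.Injective
      (fun i : Fin (j + 1) => (⟨(pvIt m i p).1.toNat * pvC m + (pvIt m i p).2.toNat,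
        hbound i⟩ : Fin (pvN m))) := by
    intro i1 i2 he
    simp only [Fin.mk.injEq] at he
    obtain ⟨v11, v12, v13, v14⟩ := hvalid i1
    obtain ⟨v21, v22, v23, v24⟩ := hvalid i2
    obtain ⟨e1, e2⟩ := pvEnc_inj (by omega) (by omega) he
    have hit : pvIt m i1 p = pvIt m i2 p := by
      have p1 : (pvIt m (i1 : Nat) p).1 = (pvIt m (i2 : Nat) p).1 := by omega
      have p2 : (pvIt m (i1 : Nat) p).2 = (pvIt m (i2 : Nat) p).2 := by omega
      exact Prod.ext p1 p2
    -- equal chain cells at distinct indices below the minimal hit contradict minimality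
    by_contra hne
    rcases Nat.lt_or_ge (i1 : Nat) (i2 : Nat) with hlt | hge
    · have hsm : pvIt m (j - ((i2 : Nat) - (i1 : Nat))) p = f0 := by
        have hi2j : (i2 : Nat) ≤ j := by omega
        have hrw : j - ((i2 : Nat) - (i1 : Nat)) = (j - (i2 : Nat)) + (i1 : Nat) := by omega
        rw [hrw]
        unfold pvIt at hit ⊢
        rw [Function.iterate_add_apply, hit, ← Function.iterate_add_apply]
        have : j - (i2 : Nat) + (i2 : Nat) = j := by omega
        rw [this]
        exact hj
      exact hmin _ (by omega) hsm
    · have hlt2 : (i2 : Nat) < (i1 : Nat) := by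
        rcases Nat.lt_or_ge (i2 : Nat) (i1 : Nat) with h | h
        · exact h
        · exfalso; exact hne (Fin.ext (by omega))
      have hsm : pvIt m (j - ((i1 : Nat) - (i2 : Nat))) p = f0 := by
        have hi1j : (i1 : Nat) ≤ j := by omega
        have hrw : j - ((i1 : Nat) - (i2 : Nat)) = (j - (i1 : Nat)) + (i2 : Nat) := by omega
        rw [hrw]
        unfold pvIt at hit ⊢
        rw [Function.iterate_add_apply, ← hit, ← Function.iterate_add_apply]
        have : j - (i1 : Nat) + (i1 : Nat) = j := by omega
        rw [this]
        exact hj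
      exact hmin _ (by omega) hsm
  have hcard := Fintype.card_le_of_injective _ hinj
  simp only [Fintype.card_fin] at hcard
  have hjN : j < pvN m := by omega
  refine ⟨j, ?_⟩
  unfold pvCD
  rw [List.find?_eq_some_iff_getElem]
  refine ⟨by simpa using hj, j, by simpa using hjN, by simp, ?_⟩
  intro i hi
  simp only [List.getElem_range]
  have := hmin i hi
  simpa using this

theorem pvCD_self {m : List (List String)} {f0 : Int × Int} (hN : 0 < pvN m) :
    pvCD m f0 f0 = some 0 := by
  unfold pvCD
  rw [List.find?_eq_some_iff_getElem]
  exact ⟨by simp [pvIt], 0, by simpa using hN, by simp, fun j hj => by omega⟩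

theorem pvCD_succ {m : List (List String)} (hR : 0 < pvR m) (hC : 0 < pvC m)
    {f0 p : Int × Int} (hp : pvValid m p) (hne : p ≠ f0) :
    pvCD m f0 p = (pvCD m f0 (pvStepP m p)).map (· + 1) := by
  cases hcs : pvCD m f0 (pvStepP m p) with
  | some k =>
    obtain ⟨hkN, hk, hkmin⟩ := pvCD_spec hcs
    have hreach : pvIt m (k + 1) p = f0 := by
      unfold pvIt at hk ⊢
      rw [Function.iterate_succ_apply]
      exact hk
    obtain ⟨j, hj⟩ := pvCD_of_reach hR hC hp hreach
    obtain ⟨hjN, hjit, hjmin⟩ := pvCD_spec hj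
    rw [hj, Option.map_some]
    cases j with
    | zero => exact absurd hjit hne
    | succ j' =>
      have hj'it : pvIt m j' (pvStepP m p) = f0 := by
        unfold pvIt at hjit ⊢
        rw [← Function.iterate_succ_apply]
        exact hjit
      have h1 : k ≤ j' := by
        by_contra hh
        exact hkmin j' (by omega) hj'it
      have h2 : j' ≤ k := by
        by_contra hh
        apply hjmin (k + 1) (by omega)
        exact hreach
      have : j' = k := by omega
      rw [this]
  | none =>
    cases h : pvCD m f0 p with
    | none => rfl
    | some j =>
      exfalso
      obtain ⟨hjN, hjit, hjmin⟩ := pvCD_spec h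
      cases j with
      | zero => exact hne hjit
      | succ j' =>
        have hj'it : pvIt m j' (pvStepP m p) = f0 := by
          unfold pvIt at hjit ⊢
          rw [← Function.iterate_succ_apply]
          exact hjit
        obtain ⟨k, hk⟩ := pvCD_of_reach hR hC (pvStepP_valid hR hC p) hj'it
        rw [hk] at hcs
        simp at hcs

-- ===== B-side: the fixed-point iteration computes pvG =====
def pvDk (m : List (List String)) (f0 : Int × Int) (k : Nat) (p : Int × Int) : Int :=
  match pvCD m f0 p with
  | some j => if j ≤ k then (j : Int) else -1
  | none => -1

theorem pvMapGrid_congr {α : Type} {R C : Nat} {F F' : Nat → Nat → α}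
    (h : ∀ r < R, ∀ c < C, F r c = F' r c) :
    ((List.range R).map fun r => (List.range C).map fun c => F r c)
      = (List.range R).map fun r => (List.range C).map fun c => F' r c := by
  apply List.map_congr_left
  intro r hr
  apply List.map_congr_left
  intro c hc
  exact h r (List.mem_range.mp hr) c (List.mem_range.mp hc)

theorem pvValid_mk {m : List (List String)} {r c : Nat} (hr : r < pvR m) (hc : c < pvC m) :
    pvValid m ((r : Int), (c : Int)) := by
  refine ⟨?_, ?_, ?_, ?_⟩ <;> simp only [pvValid] <;> omega

theorem pvD0_eq_dk (m : List (List String)) (f0 : Int × Int) (hN : 0 < pvN m) :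
    ((List.range (pvR m)).map fun (r : Nat) => (List.range (pvC m)).map fun (c : Nat) =>
        if ((r : Int), (c : Int)) = f0 then (0 : Int) else -1)
      = (List.range (pvR m)).map fun (r : Nat) => (List.range (pvC m)).map fun (c : Nat) =>
          pvDk m f0 0 ((r : Int), (c : Int)) := by
  apply pvMapGrid_congr
  intro r hr c hc
  by_cases hf : ((r : Int), (c : Int)) = f0
  · rw [if_pos hf, hf]
    simp [pvDk, pvCD_self hN]
  · rw [if_neg hf]
    unfold pvDk
    cases h : pvCD m f0 ((r : Int), (c : Int)) with
    | none => rfl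
    | some j =>
      obtain ⟨_, hit, _⟩ := pvCD_spec h
      have hj0 : j ≠ 0 := by
        intro h0
        subst h0
        exact hf hit
      simp only []
      rw [if_neg (by omega)]

theorem pvUpd_dk (m : List (List String)) (hR : 0 < pvR m) (hC : 0 < pvC m)
    {f0 : Int × Int} (hN : 0 < pvN m) (k : Nat) :
    pvUpdB m (pvR m) (pvC m) f0
      ((List.range (pvR m)).map fun (r : Nat) => (List.range (pvC m)).map fun (c : Nat) =>
        pvDk m f0 k ((r : Int), (c : Int)))
    = (List.range (pvR m)).map fun (r : Nat) => (List.range (pvC m)).map fun (c : Nat) =>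
        pvDk m f0 (k + 1) ((r : Int), (c : Int)) := by
  unfold pvUpdB
  apply pvMapGrid_congr
  intro r hr c hc
  by_cases hf : ((r : Int), (c : Int)) = f0
  · rw [if_pos hf]
    rw [hf]
    simp [pvDk, pvCD_self hN]
  · rw [if_neg hf]
    have hvp : pvValid m ((r : Int), (c : Int)) := pvValid_mk hr hc
    have hsv : pvValid m (pvStepP m ((r : Int), (c : Int))) := pvStepP_valid hR hC _
    have hget : pvGet2
        ((List.range (pvR m)).map fun (r : Nat) => (List.range (pvC m)).map fun (c : Nat) =>
          pvDk m f0 k ((r : Int), (c : Int)))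
        (pvStepP m ((r : Int), (c : Int))).1
        (pvStepP m ((r : Int), (c : Int))).2 0
        = pvDk m f0 k (pvStepP m ((r : Int), (c : Int))) := by
      have hmg := pvGet2_mapGrid (fun r c => pvDk m f0 k ((r : Int), (c : Int)))
        (t := pvStepP m ((r : Int), (c : Int))) hsv 0
      rw [hmg]
      obtain ⟨a1, a2, a3, a4⟩ := hsv
      congr 1
      apply Prod.ext <;> simp only [] <;> omega
    show (let n := pvStepP m ((r : Int), (c : Int));
      let v := pvGet2
        ((List.range (pvR m)).map fun (r : Nat) => (List.range (pvC m)).map fun (c : Nat) =>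
          pvDk m f0 k ((r : Int), (c : Int))) n.1 n.2 0;
      if v ≥ 0 then v + 1 else -1) = pvDk m f0 (k + 1) ((r : Int), (c : Int))
    simp only []
    rw [hget]
    have hsucc := pvCD_succ hR hC hvp hf
    cases hcs : pvCD m f0 (pvStepP m ((r : Int), (c : Int))) with
    | none =>
      have hp' : pvCD m f0 ((r : Int), (c : Int)) = none := by rw [hsucc, hcs]; rfl
      simp [pvDk, hcs, hp']
    | some j =>
      have hp' : pvCD m f0 ((r : Int), (c : Int)) = some (j + 1) := by rw [hsucc, hcs]; rfl
      simp only [pvDk, hcs, hp']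
      by_cases hjk : j ≤ k
      · rw [if_pos hjk, if_pos (by omega), if_pos (by omega)]
        push_cast
        ring
      · rw [if_neg hjk, if_neg (by omega), if_neg (by omega)]

theorem pvIter_dk (m : List (List String)) (hR : 0 < pvR m) (hC : 0 < pvC m)
    {f0 : Int × Int} (hN : 0 < pvN m) (k : Nat) :
    (pvUpdB m (pvR m) (pvC m) f0)^[k]
      ((List.range (pvR m)).map fun (r : Nat) => (List.range (pvC m)).map fun (c : Nat) =>
        if ((r : Int), (c : Int)) = f0 then (0 : Int) else -1)
    = (List.range (pvR m)).map fun (r : Nat) => (List.range (pvC m)).map fun (c : Nat) =>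
        pvDk m f0 k ((r : Int), (c : Int)) := by
  induction k with
  | zero => simpa using pvD0_eq_dk m f0 hN
  | succ k ih =>
    rw [Function.iterate_succ_apply', ih, pvUpd_dk m hR hC hN k]

theorem pvDkN_eq_G (m : List (List String)) (f0 : Int × Int) :
    ((List.range (pvR m)).map fun (r : Nat) => (List.range (pvC m)).map fun (c : Nat) =>
        pvDk m f0 (pvN m) ((r : Int), (c : Int))) = pvG m f0 := by
  unfold pvG
  apply pvMapGrid_congr
  intro r hr c hc
  unfold pvDk pvCdI
  cases h : pvCD m f0 ((r : Int), (c : Int)) with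
  | none => rfl
  | some j =>
    obtain ⟨hjN, _, _⟩ := pvCD_spec h
    simp only []
    rw [if_pos (by omega)]

theorem pvLoopB_eq_iterate (m : List (List String)) (f0 : Int × Int) (k : Nat)
    (d : List (List Int)) :
    pvLoopB m (pvR m) (pvC m) f0 k d = (pvUpdB m (pvR m) (pvC m) f0)^[k] d := by
  induction k generalizing d with
  | zero => rfl
  | succ k ih =>
    show (let d' := pvUpdB m (pvR m) (pvC m) f0 d;
      if d' = d then d else pvLoopB m (pvR m) (pvC m) f0 k d') = _
    by_cases h : pvUpdB m (pvR m) (pvC m) f0 d = d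
    · simp only [h]
      exact (Function.iterate_fixed h (k + 1)).symm
    · simp only [if_neg h]
      rw [ih, ← Function.iterate_succ_apply]

theorem pvAlt_eq_G (m : List (List String)) (hp : Pre_path_counter m) {f0 : Int × Int}
    (hf : pvFindA m (pvR m) (pvC m) = some f0) :
    path_counter_alt m = pvG m f0 := by
  have hR : 0 < pvR m := by
    obtain ⟨h1, _⟩ := hp
    cases m with
    | nil => exact absurd rfl h1
    | cons a l => simp [pvR]
  have hC : 0 < pvC m := hp.2.1
  have hN : 0 < pvN m := Nat.mul_pos hR hC
  show (match pvFindB m m.length (m.headD []).length with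
    | none => []
    | some f0 =>
      pvLoopB m m.length (m.headD []).length f0 (m.length * (m.headD []).length)
        ((List.range m.length).map fun (r : Nat) =>
          (List.range (m.headD []).length).map fun (c : Nat) =>
            if ((r : Int), (c : Int)) = f0 then (0 : Int) else -1)) = pvG m f0
  rw [show m.length = pvR m from rfl, show (m.headD []).length = pvC m from rfl]
  rw [pvFind_eq m (pvR m) (pvC m), hf]
  simp only []
  rw [pvLoopB_eq_iterate m f0 (pvR m * pvC m) _]
  rw [show pvR m * pvC m = pvN m from rfl]
  rw [pvIter_dk m hR hC hN (pvN m)]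
  exact pvDkN_eq_G m f0

-- ===== A-side: the BFS computes pvG =====
-- ===== A-side helper machinery =====
def pvPred (m : List (List String)) (t : Int × Int) (q : Int × Int) : Bool :=
  (!(pvCell m q.1.toNat q.2.toNat == "f")) && (pvStepP m q == t)

def pvBig (m : List (List String)) (g : List (List (List (Int × Int)))) (rc : Nat × Nat) :
    List (List (List (Int × Int))) :=
  if pvCell m rc.1 rc.2 = "f" then g
  else
    let p := pvStep m (pvR m) (pvC m) rc.1 rc.2
    pvMod2 g p.1 p.2 (fun l => l ++ [((rc.1 : Int), (rc.2 : Int))])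

theorem pvRG_as_fold (m : List (List String)) :
    pvRG m (pvR m) (pvC m) =
      ((List.range (pvR m)).flatMap fun (r : Nat) => (List.range (pvC m)).map fun (c : Nat) => (r, c)).foldl
        (pvBig m) (List.replicate (pvR m) (List.replicate (pvC m) [])) := by
  rw [List.foldl_flatMap]
  unfold pvRG
  congr 1
  funext g r
  rw [List.foldl_map]
  rfl

theorem pvRGfold_char (m : List (List String)) (hR : 0 < pvR m) (hC : 0 < pvC m) :
    ∀ (P : List (Nat × Nat)) (g0 : List (List (List (Int × Int)))),
      pvShape (pvR m) (pvC m) g0 →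
      ∀ t : Int × Int, pvValid m t →
        pvGet2 (P.foldl (pvBig m) g0) t.1 t.2 [] =
          pvGet2 g0 t.1 t.2 [] ++
            (P.map fun rc => ((rc.1 : Int), (rc.2 : Int))).filter (pvPred m t) := by
  intro P
  induction P with
  | nil => intro g0 _ t _; simp
  | cons x P ih =>
    intro g0 hsh t ht
    rw [List.foldl_cons, List.map_cons, List.filter_cons]
    by_cases hcf : pvCell m x.1 x.2 = "f"
    · have hbig : pvBig m g0 x = g0 := by unfold pvBig; rw [if_pos hcf]
      have hpred : pvPred m t ((x.1 : Int), (x.2 : Int)) = false := by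
        unfold pvPred
        have hcc : pvCell m ((x.1 : Int), (x.2 : Int)).1.toNat ((x.1 : Int), (x.2 : Int)).2.toNat = "f" := by
          simpa using hcf
        simp only [Bool.and_eq_false_iff]
        left
        simp only [Bool.not_eq_false', beq_iff_eq]
        exact hcc
      rw [hbig, hpred, ih g0 hsh t ht]
      simp
    · have hsv : pvValid m (pvStepP m ((x.1 : Int), (x.2 : Int))) := pvStepP_valid hR hC _
      have hstep : pvStep m (pvR m) (pvC m) (x.1 : Int) (x.2 : Int)
          = pvStepP m ((x.1 : Int), (x.2 : Int)) := rfl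
      have hbig : pvBig m g0 x
          = pvMod2 g0 (pvStepP m ((x.1 : Int), (x.2 : Int))).1 (pvStepP m ((x.1 : Int), (x.2 : Int))).2
              (fun l => l ++ [((x.1 : Int), (x.2 : Int))]) := by
        unfold pvBig
        rw [if_neg hcf]
        rfl
      rw [hbig, ih _ (pvShape_mod2 hsh _ _ _) t ht]
      rw [pvGet2_mod2 hsh hsv ht]
      have hpred : pvPred m t ((x.1 : Int), (x.2 : Int))
          = (pvStepP m ((x.1 : Int), (x.2 : Int)) == t) := by
        unfold pvPred
        have hcc : (pvCell m ((x.1 : Int), (x.2 : Int)).1.toNat ((x.1 : Int), (x.2 : Int)).2.toNat == "f") = false := by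
          simpa using hcf
        rw [hcc]
        simp
      rw [hpred]
      by_cases hst : pvStepP m ((x.1 : Int), (x.2 : Int)) = t
      · rw [hst]
        simp [List.append_assoc]
      · rw [if_neg (fun h => hst h.symm), if_neg (by simpa using hst)]

theorem pvRG_char (m : List (List String)) (hR : 0 < pvR m) (hC : 0 < pvC m)
    (t : Int × Int) (ht : pvValid m t) :
    pvGet2 (pvRG m (pvR m) (pvC m)) t.1 t.2 [] = (pvRowMajor (pvR m) (pvC m)).filter (pvPred m t) := by
  rw [pvRG_as_fold]
  rw [pvRGfold_char m hR hC _ _ (pvShape_replicate _ _ _) t ht]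
  have h0 : pvGet2 (List.replicate (pvR m) (List.replicate (pvC m) ([] : List (Int × Int)))) t.1 t.2 [] = [] := by
    unfold pvGet2
    obtain ⟨h1, h2, h3, h4⟩ := ht
    have hb1 : t.1.toNat < (List.replicate (pvR m) (List.replicate (pvC m) ([] : List (Int × Int)))).length := by
      rw [List.length_replicate]; omega
    rw [List.getD_eq_getElem _ _ hb1, List.getElem_replicate]
    have hb2 : t.2.toNat < (List.replicate (pvC m) ([] : List (Int × Int))).length := by
      rw [List.length_replicate]; omega
    rw [List.getD_eq_getElem _ _ hb2, List.getElem_replicate]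
  rw [h0, List.nil_append]
  congr 1
  unfold pvRowMajor
  rw [List.map_flatMap]
  congr 1
  funext r
  rw [List.map_map]
  rfl

def pvVS (R C : Nat) : Finset (Int × Int) :=
  ((Finset.range R) ×ˢ (Finset.range C)).image fun rc => ((rc.1 : Int), (rc.2 : Int))

theorem pvMem_VS {R C : Nat} {t : Int × Int} :
    t ∈ pvVS R C ↔ (0 ≤ t.1 ∧ t.1 < (R : Int) ∧ 0 ≤ t.2 ∧ t.2 < (C : Int)) := by
  unfold pvVS
  simp only [Finset.mem_image, Finset.mem_product, Finset.mem_range]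
  constructor
  · rintro ⟨⟨a, b⟩, ⟨ha, hb⟩, rfl⟩
    refine ⟨?_, ?_, ?_, ?_⟩ <;> simp only [] <;> omega
  · rintro ⟨h1, h2, h3, h4⟩
    refine ⟨(t.1.toNat, t.2.toNat), ⟨by omega, by omega⟩, ?_⟩
    obtain ⟨a, b⟩ := t
    simp only [Prod.mk.injEq]
    simp only [] at h1 h3
    constructor <;> omega

theorem pvVS_card {R C : Nat} : (pvVS R C).card = R * C := by
  unfold pvVS
  rw [Finset.card_image_of_injective]
  · simp [Finset.card_product]
  · intro a b h
    simp only [Prod.mk.injEq] at h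
    obtain ⟨h1, h2⟩ := h
    apply Prod.ext <;> omega

def pvUn (R C : Nat) (D : List (List Int)) : Nat :=
  ((pvVS R C).filter fun t => pvGet2 D t.1 t.2 0 = -1).card

theorem pvUn_le {R C : Nat} (D : List (List Int)) : pvUn R C D ≤ R * C := by
  unfold pvUn
  calc _ ≤ (pvVS R C).card := Finset.card_filter_le _ _
    _ = R * C := pvVS_card

-- effect of the inner fold (processing the predecessor list of a dequeued cell p)
theorem pvFold_char (m : List (List String)) (p : Int × Int) :
    ∀ (l : List (Int × Int)) (q1 : List (Int × Int)) (D1 : List (List Int)),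
      pvShape (pvR m) (pvC m) D1 →
      (∀ x ∈ l, pvValid m x) → l.Nodup →
      pvValid m p → pvGet2 D1 p.1 p.2 0 ≠ -1 →
      (l.foldl (fun st pr => if pvGet2 st.2 pr.1 pr.2 0 = -1 then
          (st.1 ++ [pr], pvMod2 st.2 pr.1 pr.2 (fun _ => pvGet2 st.2 p.1 p.2 0 + 1))
        else st) (q1, D1)).1
        = q1 ++ l.filter (fun x => pvGet2 D1 x.1 x.2 0 == -1) ∧
      pvShape (pvR m) (pvC m)
        (l.foldl (fun st pr => if pvGet2 st.2 pr.1 pr.2 0 = -1 then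
          (st.1 ++ [pr], pvMod2 st.2 pr.1 pr.2 (fun _ => pvGet2 st.2 p.1 p.2 0 + 1))
        else st) (q1, D1)).2 ∧
      (∀ t : Int × Int, pvValid m t →
        pvGet2 (l.foldl (fun st pr => if pvGet2 st.2 pr.1 pr.2 0 = -1 then
          (st.1 ++ [pr], pvMod2 st.2 pr.1 pr.2 (fun _ => pvGet2 st.2 p.1 p.2 0 + 1))
        else st) (q1, D1)).2 t.1 t.2 0
          = if t ∈ l ∧ pvGet2 D1 t.1 t.2 0 = -1 then pvGet2 D1 p.1 p.2 0 + 1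
            else pvGet2 D1 t.1 t.2 0) := by
  intro l
  induction l with
  | nil =>
    intro q1 D1 hsh _ _ _ _
    refine ⟨by simp, hsh, ?_⟩
    intro t _
    simp
  | cons x l ih =>
    intro q1 D1 hsh hval hnd hpv hpa
    have hxv : pvValid m x := hval x List.mem_cons_self
    rw [List.foldl_cons, List.filter_cons]
    by_cases hx : pvGet2 D1 x.1 x.2 0 = -1
    · rw [if_pos hx]
      have hxp : x ≠ p := fun he => hpa (he ▸ hx)
      -- the updated grid
      have hsh' := pvShape_mod2 hsh x.1 x.2 (fun _ => pvGet2 D1 p.1 p.2 0 + 1)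
      have hDval : ∀ t : Int × Int, pvValid m t →
          pvGet2 (pvMod2 D1 x.1 x.2 (fun _ => pvGet2 D1 p.1 p.2 0 + 1)) t.1 t.2 0
            = if t = x then pvGet2 D1 p.1 p.2 0 + 1 else pvGet2 D1 t.1 t.2 0 := by
        intro t ht
        rw [pvGet2_mod2 hsh hxv ht]
      have hpD : pvGet2 (pvMod2 D1 x.1 x.2 (fun _ => pvGet2 D1 p.1 p.2 0 + 1)) p.1 p.2 0
          = pvGet2 D1 p.1 p.2 0 := by
        rw [hDval p hpv, if_neg (fun he => hxp he.symm)]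
      obtain ⟨ih1, ih2, ih3⟩ := ih (q1 ++ [x]) _ hsh' (fun y hy => hval y (List.mem_cons_of_mem _ hy))
        hnd.of_cons hpv (by rw [hpD]; exact hpa)
      refine ⟨?_, ?_, ?_⟩
      · rw [ih1]
        have : l.filter (fun y => pvGet2 (pvMod2 D1 x.1 x.2 (fun _ => pvGet2 D1 p.1 p.2 0 + 1)) y.1 y.2 0 == -1)
            = l.filter (fun y => pvGet2 D1 y.1 y.2 0 == -1) := by
          apply List.filter_congr
          intro y hy
          have hyx : y ≠ x := fun he => (List.nodup_cons.mp hnd).1 (he ▸ hy)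
          rw [hDval y (hval y (List.mem_cons_of_mem _ hy)), if_neg hyx]
        rw [this]
        simp [hx, List.append_assoc]
      · exact ih2
      · intro t ht
        have := ih3 t ht
        rw [hpD] at this
        rw [this]
        by_cases htl : t ∈ l
        · have htx : t ≠ x := fun he => (List.nodup_cons.mp hnd).1 (he ▸ htl)
          rw [hDval t ht, if_neg htx]
          by_cases htm : pvGet2 D1 t.1 t.2 0 = -1
          · rw [if_pos ⟨htl, htm⟩, if_pos ⟨List.mem_cons_of_mem _ htl, htm⟩]
          · rw [if_neg (fun hc => htm hc.2), if_neg (fun hc => htm hc.2)]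
        · by_cases htx : t = x
          · subst htx
            rw [if_neg (fun hc => htl hc.1)]
            rw [hDval t ht, if_pos rfl, if_pos ⟨List.mem_cons_self, hx⟩]
          · rw [if_neg (fun hc => htl hc.1), hDval t ht, if_neg htx,
              if_neg (fun hc => (List.mem_cons.mp hc.1).elim htx htl)]
    · rw [if_neg hx]
      have hxf : (pvGet2 D1 x.1 x.2 0 == -1) = false := by simpa using hx
      rw [hxf]
      obtain ⟨ih1, ih2, ih3⟩ := ih q1 D1 hsh (fun y hy => hval y (List.mem_cons_of_mem _ hy))
        hnd.of_cons hpv hpa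
      refine ⟨by simpa using ih1, ih2, ?_⟩
      intro t ht
      rw [ih3 t ht]
      by_cases htx : t = x
      · subst htx
        rw [if_neg (fun hc => hx hc.2), if_neg (fun hc => hx hc.2)]
      · by_cases htl : t ∈ l
        · by_cases htm : pvGet2 D1 t.1 t.2 0 = -1
          · rw [if_pos ⟨htl, htm⟩, if_pos ⟨List.mem_cons_of_mem _ htl, htm⟩]
          · rw [if_neg (fun hc => htm hc.2), if_neg (fun hc => htm hc.2)]
        · rw [if_neg (fun hc => htl hc.1),
            if_neg (fun hc => (List.mem_cons.mp hc.1).elim htx htl)]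

theorem pvUn_after (m : List (List String)) {D D' : List (List Int)} {l : List (Int × Int)} {w : Int}
    (hw : w ≠ -1) (hval : ∀ x ∈ l, pvValid m x) (hnd : l.Nodup)
    (hchar : ∀ t : Int × Int, pvValid m t →
      pvGet2 D' t.1 t.2 0 = if t ∈ l ∧ pvGet2 D t.1 t.2 0 = -1 then w else pvGet2 D t.1 t.2 0) :
    pvUn (pvR m) (pvC m) D' + (l.filter (fun x => pvGet2 D x.1 x.2 0 == -1)).length
      = pvUn (pvR m) (pvC m) D := by
  classical
  set S := (l.filter (fun x => pvGet2 D x.1 x.2 0 == -1)).toFinset with hS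
  have hmemS : ∀ t : Int × Int, t ∈ S ↔ (t ∈ l ∧ pvGet2 D t.1 t.2 0 = -1) := by
    intro t
    rw [hS, List.mem_toFinset, List.mem_filter]
    simp
  have hndS : S.card = (l.filter (fun x => pvGet2 D x.1 x.2 0 == -1)).length := by
    rw [hS, List.toFinset_card_of_nodup (hnd.filter _)]
  have hsub : S ⊆ (pvVS (pvR m) (pvC m)).filter (fun t => pvGet2 D t.1 t.2 0 = -1) := by
    intro t ht
    rw [hmemS] at ht
    rw [Finset.mem_filter, pvMem_VS]
    exact ⟨hval t ht.1, ht.2⟩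
  have hset : (pvVS (pvR m) (pvC m)).filter (fun t => pvGet2 D' t.1 t.2 0 = -1)
      = ((pvVS (pvR m) (pvC m)).filter (fun t => pvGet2 D t.1 t.2 0 = -1)) \ S := by
    ext t
    rw [Finset.mem_sdiff, Finset.mem_filter, Finset.mem_filter, hmemS]
    constructor
    · rintro ⟨htV, htD'⟩
      have hv : pvValid m t := pvMem_VS.mp htV
      rw [hchar t hv] at htD'
      by_cases hc : t ∈ l ∧ pvGet2 D t.1 t.2 0 = -1
      · rw [if_pos hc] at htD'
        exact absurd htD' hw
      · rw [if_neg hc] at htD'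
        exact ⟨⟨htV, htD'⟩, fun hc2 => hc hc2⟩
    · rintro ⟨⟨htV, htD⟩, htS⟩
      have hv : pvValid m t := pvMem_VS.mp htV
      refine ⟨htV, ?_⟩
      rw [hchar t hv, if_neg htS]
      exact htD
  have hcardle := Finset.card_le_card hsub
  unfold pvUn
  have hint : S ∩ ((pvVS (pvR m) (pvC m)).filter (fun t => pvGet2 D t.1 t.2 0 = -1)) = S :=
    Finset.inter_eq_left.mpr hsub
  rw [hset, Finset.card_sdiff, hint, hndS]
  omega

-- the BFS loop invariant
def pvInv (m : List (List String)) (f0 : Int × Int) (q : List (Int × Int))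
    (D : List (List Int)) : Prop :=
  pvShape (pvR m) (pvC m) D ∧
  q.Nodup ∧
  (∀ p ∈ q, pvValid m p ∧ pvGet2 D p.1 p.2 0 ≠ -1) ∧
  (∀ p : Int × Int, pvValid m p → pvGet2 D p.1 p.2 0 ≠ -1 →
    ∃ j, pvCD m f0 p = some j ∧ pvGet2 D p.1 p.2 0 = (j : Int)) ∧
  (∀ p : Int × Int, pvValid m p → pvGet2 D p.1 p.2 0 = -1 →
    pvGet2 D (pvStepP m p).1 (pvStepP m p).2 0 ≠ -1 → pvStepP m p ∈ q) ∧
  pvGet2 D f0.1 f0.2 0 ≠ -1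

theorem pvStepP_fixed (m : List (List String)) (hR : 0 < pvR m) (hC : 0 < pvC m)
    {t : Int × Int} (ht : pvValid m t) (hcf : pvCell m t.1.toNat t.2.toNat = "f") :
    pvStepP m t = t := by
  obtain ⟨h1, h2, h3, h4⟩ := ht
  unfold pvStepP pvStep
  rw [hcf]
  have hd : pvDir "f" = (0, 0) := by decide
  rw [hd]
  have hR' : (0 : Int) < (pvR m : Int) := by exact_mod_cast hR
  have hC' : (0 : Int) < (pvC m : Int) := by exact_mod_cast hC
  apply Prod.ext
  · show PySem.Int.mod (t.1 + 0) (pvR m : Int) = t.1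
    rw [add_zero, PySem.Int.mod_eq_emod_of_pos hR', Int.emod_eq_of_lt h1 h2]
  · show PySem.Int.mod (t.2 + 0) (pvC m : Int) = t.2
    rw [add_zero, PySem.Int.mod_eq_emod_of_pos hC', Int.emod_eq_of_lt h3 h4]

theorem pvBFS_main (m : List (List String)) (f0 : Int × Int) (hR : 0 < pvR m) (hC : 0 < pvC m)
    (hv0 : pvValid m f0) :
    ∀ (fuel : Nat) (q : List (Int × Int)) (D : List (List Int)),
      pvInv m f0 q D → q.length + pvUn (pvR m) (pvC m) D ≤ fuel →
      pvShape (pvR m) (pvC m) (pvBFSA (pvRG m (pvR m) (pvC m)) fuel q D) ∧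
      (∀ p : Int × Int, pvValid m p →
        pvGet2 (pvBFSA (pvRG m (pvR m) (pvC m)) fuel q D) p.1 p.2 0 ≠ -1 →
        ∃ j, pvCD m f0 p = some j ∧
          pvGet2 (pvBFSA (pvRG m (pvR m) (pvC m)) fuel q D) p.1 p.2 0 = (j : Int)) ∧
      (∀ p : Int × Int, pvValid m p →
        pvGet2 (pvBFSA (pvRG m (pvR m) (pvC m)) fuel q D) p.1 p.2 0 = -1 →
        pvGet2 (pvBFSA (pvRG m (pvR m) (pvC m)) fuel q D) (pvStepP m p).1 (pvStepP m p).2 0 = -1) ∧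
      pvGet2 (pvBFSA (pvRG m (pvR m) (pvC m)) fuel q D) f0.1 f0.2 0 ≠ -1 := by
  intro fuel
  induction fuel with
  | zero =>
    intro q D hInv hfuel
    obtain ⟨hsh, hnd, hq, hcorr, hfront, hf0⟩ := hInv
    have hq0 : q = [] := by
      cases q with
      | nil => rfl
      | cons a q => simp at hfuel
    subst hq0
    refine ⟨hsh, hcorr, ?_, hf0⟩
    intro p hp hD
    by_contra hs
    exact absurd (hfront p hp hD hs) (List.not_mem_nil)
  | succ fuel ih =>
    intro q D hInv hfuel
    obtain ⟨hsh, hnd, hq, hcorr, hfront, hf0⟩ := hInv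
    cases q with
    | nil =>
      refine ⟨hsh, hcorr, ?_, hf0⟩
      intro p hp hD
      by_contra hs
      exact absurd (hfront p hp hD hs) (List.not_mem_nil)
    | cons p rest =>
      obtain ⟨hpv, hpa⟩ := hq p List.mem_cons_self
      obtain ⟨jp, hjp, hjpval⟩ := hcorr p hpv hpa
      -- the predecessor list
      set l := pvGet2 (pvRG m (pvR m) (pvC m)) p.1 p.2 [] with hl
      have hlchar : l = (pvRowMajor (pvR m) (pvC m)).filter (pvPred m p) :=
        pvRG_char m hR hC p hpv
      have hlval : ∀ x ∈ l, pvValid m x := by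
        intro x hx
        rw [hlchar, List.mem_filter] at hx
        exact pvMem_rowMajor.mp hx.1
      have hlnd : l.Nodup := by
        rw [hlchar]
        exact pvNodup_rowMajor.filter _
      have hlmem : ∀ x : Int × Int, x ∈ l ↔
          (pvValid m x ∧ pvCell m x.1.toNat x.2.toNat ≠ "f" ∧ pvStepP m x = p) := by
        intro x
        rw [hlchar, List.mem_filter, pvMem_rowMajor]
        unfold pvPred
        constructor
        · rintro ⟨hv, hb⟩
          rw [Bool.and_eq_true] at hb
          refine ⟨hv, ?_, ?_⟩
          · simpa using hb.1
          · simpa using hb.2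
        · rintro ⟨hv, hc, hs⟩
          refine ⟨hv, ?_⟩
          rw [Bool.and_eq_true]
          constructor
          · simpa using hc
          · simpa using hs
      obtain ⟨hst1, hst2sh, hstval⟩ := pvFold_char m p l rest D hsh hlval hlnd hpv hpa
      set st := l.foldl (fun st pr => if pvGet2 st.2 pr.1 pr.2 0 = -1 then
          (st.1 ++ [pr], pvMod2 st.2 pr.1 pr.2 (fun _ => pvGet2 st.2 p.1 p.2 0 + 1))
        else st) (rest, D) with hstdef
      set newl := l.filter (fun x => pvGet2 D x.1 x.2 0 == -1) with hnewl
      have hnewlval : ∀ x ∈ newl, pvValid m x := by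
        intro x hx
        exact hlval x (List.mem_of_mem_filter hx)
      have hnewlD : ∀ x ∈ newl, pvGet2 D x.1 x.2 0 = -1 := by
        intro x hx
        have := (List.mem_filter.mp hx).2
        simpa using this
      have hjp0 : (0 : Int) ≤ pvGet2 D p.1 p.2 0 := by
        rw [hjpval]; positivity
      have hw : pvGet2 D p.1 p.2 0 + 1 ≠ -1 := by omega
      have hun := pvUn_after m hw hlval hlnd hstval
      -- step: pvBFSA (fuel+1) (p::rest) D = pvBFSA fuel st.1 st.2
      have hunf : pvBFSA (pvRG m (pvR m) (pvC m)) (fuel + 1) (p :: rest) D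
          = pvBFSA (pvRG m (pvR m) (pvC m)) fuel st.1 st.2 := rfl
      rw [hunf]
      -- new invariant
      apply ih st.1 st.2
      · refine ⟨hst2sh, ?_, ?_, ?_, ?_, ?_⟩
        · -- Nodup
          rw [hst1]
          apply List.Nodup.append (hnd.of_cons) (hlnd.filter _)
          intro a ha hanew
          have := (hq a (List.mem_cons_of_mem _ ha)).2
          exact this (hnewlD a hanew)
        · -- queue members valid and assigned
          intro x hx
          rw [hst1, List.mem_append] at hx
          cases hx with
          | inl hx =>
            obtain ⟨hxv, hxa⟩ := hq x (List.mem_cons_of_mem _ hx)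
            refine ⟨hxv, ?_⟩
            rw [hstval x hxv]
            split
            · exact hw
            · exact hxa
          | inr hx =>
            have hxv := hnewlval x hx
            refine ⟨hxv, ?_⟩
            rw [hstval x hxv, if_pos ⟨List.mem_of_mem_filter hx, hnewlD x hx⟩]
            exact hw
        · -- correctness of assigned values
          intro t ht hta
          rw [hstval t ht] at hta ⊢
          by_cases hc : t ∈ l ∧ pvGet2 D t.1 t.2 0 = -1
          · rw [if_pos hc] at hta ⊢
            have htf0 : t ≠ f0 := by
              intro he
              rw [he] at hc
              exact hf0 hc.2
            have hts : pvStepP m t = p := ((hlmem t).mp hc.1).2.2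
            have := pvCD_succ hR hC ht htf0
            rw [hts, hjp] at this
            refine ⟨jp + 1, by simpa using this, ?_⟩
            rw [hjpval]
            push_cast
            ring
          · rw [if_neg hc] at hta ⊢
            exact hcorr t ht hta
        · -- frontier property
          intro t ht htu hts
          rw [hstval t ht] at htu
          have htc : ¬(t ∈ l ∧ pvGet2 D t.1 t.2 0 = -1) := by
            intro hc
            rw [if_pos hc] at htu
            exact hw htu
          rw [if_neg htc] at htu
          rw [hstval _ (pvStepP_valid hR hC t)] at hts
          rw [hst1, List.mem_append]
          by_cases hsp : pvStepP m t = p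
          · exfalso
            by_cases hcf : pvCell m t.1.toNat t.2.toNat = "f"
            · have hfix := pvStepP_fixed m hR hC ht hcf
              rw [hfix] at hts hsp
              -- then t = p, but t unassigned and p assigned
              rw [hsp] at htu
              exact hpa htu
            · have htl : t ∈ l := (hlmem t).mpr ⟨ht, hcf, hsp⟩
              exact htc ⟨htl, htu⟩
          · by_cases hsl : pvStepP m t ∈ l ∧ pvGet2 D (pvStepP m t).1 (pvStepP m t).2 0 = -1
            · right
              rw [hnewl, List.mem_filter]
              exact ⟨hsl.1, by simpa using hsl.2⟩
            · rw [if_neg hsl] at hts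
              have := hfront t ht htu hts
              rw [List.mem_cons] at this
              cases this with
              | inl h => exact absurd h hsp
              | inr h => exact Or.inl h
        · -- f0 assigned
          rw [hstval f0 hv0]
          split
          · exact hw
          · exact hf0
      · -- fuel accounting
        have hlen : st.1.length = rest.length + newl.length := by
          rw [hst1]
          simp [hnewl]
        simp only [List.length_cons] at hfuel
        have hnf : newl.length = (List.filter (fun x => pvGet2 D x.1 x.2 0 == -1) l).length := by
          rw [hnewl]
        omega

theorem pvA_eq_G (m : List (List String)) (hp : Pre_path_counter m) {f0 : Int × Int}
    (hf : pvFindA m (pvR m) (pvC m) = some f0) :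
    path_counter m = pvG m f0 := by
  have hR : 0 < pvR m := by
    obtain ⟨h1, _⟩ := hp
    cases m with
    | nil => exact absurd rfl h1
    | cons a l => simp [pvR]
  have hC : 0 < pvC m := hp.2.1
  have hN : 0 < pvN m := Nat.mul_pos hR hC
  have hv0 : pvValid m f0 := pvFindA_valid hf
  have hcd0 : pvCD m f0 f0 = some 0 := pvCD_self hN
  show (match pvFindA m m.length (m.headD []).length with
    | none => []
    | some f0 =>
      pvBFSA (pvRG m m.length (m.headD []).length) (m.length * (m.headD []).length + 1) [f0]
        (pvMod2 (List.replicate m.length (List.replicate (m.headD []).length (-1))) f0.1 f0.2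
          (fun _ => 0))) = pvG m f0
  rw [show m.length = pvR m from rfl, show (m.headD []).length = pvC m from rfl, hf]
  simp only []
  set dist0 := pvMod2 (List.replicate (pvR m) (List.replicate (pvC m) (-1))) f0.1 f0.2
    (fun _ => 0) with hdist0
  have hshrep := pvShape_replicate (pvR m) (pvC m) (-1 : Int)
  have hsh0 : pvShape (pvR m) (pvC m) dist0 := pvShape_mod2 hshrep _ _ _
  have hrep : ∀ t : Int × Int, pvValid m t →
      pvGet2 (List.replicate (pvR m) (List.replicate (pvC m) (-1 : Int))) t.1 t.2 0 = -1 := by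
    intro t ht
    obtain ⟨h1, h2, h3, h4⟩ := ht
    unfold pvGet2
    have hb1 : t.1.toNat < (List.replicate (pvR m) (List.replicate (pvC m) (-1 : Int))).length := by
      rw [List.length_replicate]; omega
    rw [List.getD_eq_getElem _ _ hb1, List.getElem_replicate]
    have hb2 : t.2.toNat < (List.replicate (pvC m) (-1 : Int)).length := by
      rw [List.length_replicate]; omega
    rw [List.getD_eq_getElem _ _ hb2, List.getElem_replicate]
  have hget0 : ∀ t : Int × Int, pvValid m t →
      pvGet2 dist0 t.1 t.2 0 = if t = f0 then 0 else -1 := by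
    intro t ht
    rw [hdist0, pvGet2_mod2 hshrep hv0 ht]
    by_cases he : t = f0
    · rw [if_pos he, if_pos he]
    · rw [if_neg he, if_neg he]
      exact hrep t ht
  have hInv : pvInv m f0 [f0] dist0 := by
    refine ⟨hsh0, List.nodup_singleton _, ?_, ?_, ?_, ?_⟩
    · intro p hpm
      rw [List.mem_singleton] at hpm
      subst hpm
      rw [hget0 p hv0, if_pos rfl]
      exact ⟨hv0, by decide⟩
    · intro p hpv hpa
      rw [hget0 p hpv] at hpa ⊢
      by_cases he : p = f0
      · subst he
        rw [if_pos rfl]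
        exact ⟨0, hcd0, rfl⟩
      · rw [if_neg he] at hpa
        exact absurd rfl hpa
    · intro p hpv hpu hsa
      rw [hget0 _ (pvStepP_valid hR hC p)] at hsa
      by_cases he : pvStepP m p = f0
      · rw [he]; exact List.mem_singleton_self _
      · rw [if_neg he] at hsa
        exact absurd rfl hsa
    · rw [hget0 f0 hv0, if_pos rfl]
      decide
  have hfuel : ([f0] : List (Int × Int)).length + pvUn (pvR m) (pvC m) dist0
      ≤ pvR m * pvC m + 1 := by
    have := pvUn_le (R := pvR m) (C := pvC m) dist0
    simp only [List.length_singleton]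
    omega
  obtain ⟨hPsh, hPcorr, hPfront, hPf0⟩ := pvBFS_main m f0 hR hC hv0
    (pvR m * pvC m + 1) [f0] dist0 hInv hfuel
  set Dfin := pvBFSA (pvRG m (pvR m) (pvC m)) (pvR m * pvC m + 1) [f0] dist0 with hDfin
  have hS : ∀ (j : Nat) (t : Int × Int), pvValid m t → pvCD m f0 t = some j →
      pvGet2 Dfin t.1 t.2 0 ≠ -1 := by
    intro j
    induction j with
    | zero =>
      intro t ht hcd
      obtain ⟨_, hit, _⟩ := pvCD_spec hcd
      have : t = f0 := hit
      rw [this]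
      exact hPf0
    | succ j ihj =>
      intro t ht hcd
      have htne : t ≠ f0 := by
        intro he
        rw [he, hcd0] at hcd
        exact Nat.noConfusion (Option.some.inj hcd)
      have hsucc := pvCD_succ hR hC ht htne
      rw [hcd] at hsucc
      have hcs : pvCD m f0 (pvStepP m t) = some j := by
        cases hx : pvCD m f0 (pvStepP m t) with
        | none => rw [hx] at hsucc; simp at hsucc
        | some k =>
          rw [hx] at hsucc
          simp only [Option.map_some] at hsucc
          have hk : k + 1 = j + 1 := Option.some.inj hsucc.symm
          congr
          omega
      have hstep := ihj (pvStepP m t) (pvStepP_valid hR hC t) hcs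
      intro hD
      exact hstep (hPfront t ht hD)
  apply pvGrid_ext hPsh (pvShape_mapGrid (fun r c => pvCdI m f0 ((r : Int), (c : Int))))
  intro t ht d
  have hGt : pvGet2 ((List.range (pvR m)).map fun (r : Nat) =>
      (List.range (pvC m)).map fun (c : Nat) => pvCdI m f0 ((r : Int), (c : Int))) t.1 t.2 d
      = pvCdI m f0 t := by
    rw [pvGet2_mapGrid _ ht d]
    obtain ⟨h1, h2, h3, h4⟩ := ht
    congr 1
    apply Prod.ext <;> simp only [] <;> omega
  have hfin0 : pvGet2 Dfin t.1 t.2 d = pvGet2 Dfin t.1 t.2 0 := by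
    obtain ⟨a1, a2, e1⟩ := pvGet2_eq hPsh ht d
    obtain ⟨b1, b2, e2⟩ := pvGet2_eq hPsh ht (0 : Int)
    rw [e1, e2]
  show pvGet2 Dfin t.1 t.2 d = _
  rw [hfin0, hGt]
  cases hcd : pvCD m f0 t with
  | some j =>
    have hne := hS j t ht hcd
    obtain ⟨jp, hjp, hval⟩ := hPcorr t ht hne
    rw [hcd] at hjp
    have hjj : jp = j := Option.some.inj hjp.symm
    rw [hval, hjj]
    unfold pvCdI
    rw [hcd]
  | none =>
    by_cases hD : pvGet2 Dfin t.1 t.2 0 = -1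
    · rw [hD]
      unfold pvCdI
      rw [hcd]
    · obtain ⟨jp, hjp, _⟩ := hPcorr t ht hD
      rw [hcd] at hjp
      simp at hjp

-- ===== VERDICT (by name: the statement is the Claim_ definition above) =====
theorem path_counter_spec : Claim_equal_path_counter := by
  intro m _ hp
  unfold Spec_path_counter
  obtain ⟨f0, hf⟩ := pvFindA_isSome m hp
  rw [pvA_eq_G m hp hf, pvAlt_eq_G m hp hf]
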